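-- pv_equiv track=rewrite | github.com/whitemech/Plan4Past | benchmark/utils/triangletireworld.py | generate_future_formula_triangletireworld
-- ===== SOURCE A (Python) =====
-- def _locs_goal_order_zigzag(nb_locs: int):
--     assert nb_locs >= 2
--     result = []
--     i = 1
--     j = 1
--     while i + j <= nb_locs + 1:
--         result.append(f"l{i}x{j}")
--         if i == j:
--             i += 1
--         elif i - j == 1:
--             j += 1
--     return result
--
-- def generate_future_formula_triangletireworld(nb_locs: int):
--     """Generate formula from number of locations of a triangle side."""
--     assert nb_locs >= 2
--     order = list(reversed(_locs_goal_order_zigzag(nb_locs)))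
--     formula = f'"vehicleat {order[0]}"'
--     for i in range(1, len(order)):
--         formula = f'"vehicleat {order[i]}"&X(F({formula}))'
--     formula = f"F({formula})"
--     return formula
-- ===== SOURCE B (Python) =====
-- def generate_future_formula_triangletireworld(nb_locs: int):
--     """Generate formula from number of locations of a triangle side."""
--     assert nb_locs >= 2
--     # closed form: the k-th goal location (0-based, in zigzag order) is l{(k+3)//2}x{(k+2)//2};
--     # build the nested formula back-to-front, innermost atom first, no list and no reversal.
--     formula = f'"vehicleat l{(nb_locs + 2) // 2}x{(nb_locs + 1) // 2}"'
--     for k in range(nb_locs - 2, -1, -1):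
--         formula = f'"vehicleat l{(k + 3) // 2}x{(k + 2) // 2}"&X(F({formula}))'
--     return f"F({formula})"
-- ===== Notes on version B (the rewrite author's own statement) =====
-- stated objective: simpler
-- what changed: Replaces the stateful zigzag walk that builds a list of locations, reverses it and re-indexes it in a second loop by a closed-form location formula l{(k+3)//2}x{(k+2)//2} and a single back-to-front countdown loop that needs no list at all.
import Mathlib
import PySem

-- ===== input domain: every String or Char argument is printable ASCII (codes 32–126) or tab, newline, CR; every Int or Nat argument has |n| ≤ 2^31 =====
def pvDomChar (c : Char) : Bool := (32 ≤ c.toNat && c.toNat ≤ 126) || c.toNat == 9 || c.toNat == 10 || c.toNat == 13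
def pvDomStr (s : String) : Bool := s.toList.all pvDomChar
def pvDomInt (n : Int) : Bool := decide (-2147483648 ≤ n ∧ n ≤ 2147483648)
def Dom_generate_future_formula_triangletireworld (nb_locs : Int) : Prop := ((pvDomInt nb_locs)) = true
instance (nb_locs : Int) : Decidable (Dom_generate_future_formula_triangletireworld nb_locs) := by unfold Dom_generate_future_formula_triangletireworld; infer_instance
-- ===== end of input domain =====

-- B replaces A's stateful zigzag list + reversal + indexed loop by a closed-form location formula
-- and a single back-to-front countdown loop (objective: simpler; return value only, no side effects).

-- ===== PORT A =====
-- while-loop of _locs_goal_order_zigzag; the final 'else acc'' arm is unreachable from (i,j)=(1,1)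
-- (there Python's while would loop forever, since neither branch changes i or j).
def pvZigzag (nb_locs i j : Int) (acc : List String) : List String :=
  if hlt : i + j ≤ nb_locs + 1 then
    let acc' := acc ++ ["l" ++ PySem.Int.toStr i ++ "x" ++ PySem.Int.toStr j]
    if i = j then pvZigzag nb_locs (i + 1) j acc'
    else if i - j = 1 then pvZigzag nb_locs i (j + 1) acc'
    else acc'
  else acc
termination_by (nb_locs + 2 - i - j).toNat
decreasing_by all_goals (simp_wf; omega)

-- order[0] is transliterated with default "" : under Pre_ (nb_locs ≥ 2) the list is nonempty,
-- and for nb_locs < 2 Python raises (excluded by Pre_).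
def generate_future_formula_triangletireworld (nb_locs : Int) : String :=
  let order := (pvZigzag nb_locs 1 1 []).reverse
  let formula := "\"vehicleat " ++ PySem.List.pyGetD order 0 "" ++ "\""
  let formula := (PySem.List.pyRange 1 (order.length : Int) 1).foldl
      (fun f i => "\"vehicleat " ++ PySem.List.pyGetD order i "" ++ "\"&X(F(" ++ f ++ "))") formula
  "F(" ++ formula ++ ")"

-- ===== PORT B =====
def generate_future_formula_triangletireworld_alt (nb_locs : Int) : String :=
  let formula := "\"vehicleat l" ++ PySem.Int.toStr (PySem.Int.floordiv (nb_locs + 2) 2)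
      ++ "x" ++ PySem.Int.toStr (PySem.Int.floordiv (nb_locs + 1) 2) ++ "\""
  let formula := (PySem.List.pyRange (nb_locs - 2) (-1) (-1)).foldl
      (fun f k => "\"vehicleat l" ++ PySem.Int.toStr (PySem.Int.floordiv (k + 3) 2)
        ++ "x" ++ PySem.Int.toStr (PySem.Int.floordiv (k + 2) 2) ++ "\"&X(F(" ++ f ++ "))") formula
  "F(" ++ formula ++ ")"

-- ===== PRECONDITION & SPEC =====
-- Pre_ excludes exactly nb_locs < 2, where Python A raises AssertionError (B raises there too).
def Pre_generate_future_formula_triangletireworld (nb_locs : Int) : Prop := 2 ≤ nb_locs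
instance (nb_locs : Int) : Decidable (Pre_generate_future_formula_triangletireworld nb_locs) := by
  unfold Pre_generate_future_formula_triangletireworld; infer_instance
def pvWitness_generate_future_formula_triangletireworld : Int := (3)

def Spec_generate_future_formula_triangletireworld (nb_locs : Int) (out : String) : Prop := out = generate_future_formula_triangletireworld_alt nb_locs
instance (nb_locs : Int) (out : String) : Decidable (Spec_generate_future_formula_triangletireworld nb_locs out) := by unfold Spec_generate_future_formula_triangletireworld; infer_instance

-- ===== CLAIM (what is proved, stated in full; the proofs are below) =====
def Claim_equal_generate_future_formula_triangletireworld : Prop := ∀ (nb_locs : Int), Dom_generate_future_formula_triangletireworld nb_locs → Pre_generate_future_formula_triangletireworld nb_locs → Spec_generate_future_formula_triangletireworld nb_locs (generate_future_formula_triangletireworld nb_locs)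

-- ===== LEMMAS AND PROOFS =====

-- the k-th zigzag location, closed form
def pvLoc (k : Int) : String :=
  "l" ++ PySem.Int.toStr (PySem.Int.floordiv (k + 3) 2)
    ++ "x" ++ PySem.Int.toStr (PySem.Int.floordiv (k + 2) 2)

lemma pvLoc_eq (i j : Int) (h : i = j ∨ i = j + 1) :
    "l" ++ PySem.Int.toStr i ++ "x" ++ PySem.Int.toStr j = pvLoc (i + j - 2) := by
  unfold pvLoc
  have h1 : PySem.Int.floordiv (i + j - 2 + 3) 2 = i := by
    rw [PySem.Int.floordiv_eq_iff_of_pos (by omega)]; omega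
  have h2 : PySem.Int.floordiv (i + j - 2 + 2) 2 = j := by
    rw [PySem.Int.floordiv_eq_iff_of_pos (by omega)]; omega
  rw [h1, h2]

lemma pvZigzag_spec (n : Int) : ∀ (fuel : Nat) (i j : Int) (acc : List String),
    (n + 2 - i - j).toNat = fuel → 1 ≤ j → (i = j ∨ i = j + 1) →
    pvZigzag n i j acc = acc ++ (PySem.List.pyRange (i + j - 2) n 1).map pvLoc := by
  intro fuel
  induction fuel with
  | zero =>
    intro i j acc hf hj hij
    rw [pvZigzag, dif_neg (by omega), PySem.List.pyRange_one_eq_nil (by omega)]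
    simp
  | succ f ih =>
    intro i j acc hf hj hij
    rw [pvZigzag, dif_pos (by omega)]
    rw [PySem.List.pyRange_one_cons (by omega)]
    simp only [List.map_cons]
    rw [pvLoc_eq i j hij]
    rcases hij with hij | hij
    · rw [if_pos hij]
      rw [ih (i + 1) j _ (by omega) hj (by omega)]
      have : i + 1 + j - 2 = i + j - 2 + 1 := by ring
      rw [this]
      simp
    · rw [if_neg (by omega), if_pos (by omega)]
      rw [ih i (j + 1) _ (by omega) (by omega) (by omega)]
      have : i + (j + 1) - 2 = i + j - 2 + 1 := by ring
      rw [this]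
      simp

-- ===== VERDICT (by name: the statement is the Claim_ definition above) =====
theorem generate_future_formula_triangletireworld_spec : Claim_equal_generate_future_formula_triangletireworld := by
  intro n _ hpre
  unfold Pre_generate_future_formula_triangletireworld at hpre
  unfold Spec_generate_future_formula_triangletireworld
  unfold generate_future_formula_triangletireworld generate_future_formula_triangletireworld_alt
  have hz : (pvZigzag n 1 1 []).reverse = (PySem.List.pyRange (n - 1) (-1) (-1)).map pvLoc := by
    rw [pvZigzag_spec n (n + 2 - 1 - 1).toNat 1 1 [] rfl le_rfl (Or.inl rfl)]
    rw [PySem.List.pyRange_neg_one_eq_reverse]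
    norm_num [List.map_reverse]
  rw [hz]
  have hcons : PySem.List.pyRange (n - 1) (-1) (-1)
      = (n - 1) :: PySem.List.pyRange (n - 2) (-1) (-1) := by
    rw [show n - 1 = n - 2 + 1 from by ring, PySem.List.pyRange_neg_one_cons (by omega)]
    norm_num
  rw [hcons]
  dsimp only
  rw [PySem.List.foldl_pyRange_pyGetD'
      (List.map pvLoc ((n - 1) :: PySem.List.pyRange (n - 2) (-1) (-1))) ""
      (fun acc s => "\"vehicleat " ++ s ++ "\"&X(F(" ++ acc ++ "))") _ (by norm_num)]
  simp only [List.map_cons, Int.toNat_one, List.drop_succ_cons, List.drop_zero,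
    List.foldl_map, PySem.List.pyGetD_ofNat', List.getD_cons_zero]
  have hfun : (fun (acc : String) (k : Int) =>
        "\"vehicleat " ++ pvLoc k ++ "\"&X(F(" ++ acc ++ "))")
      = (fun (f : String) (k : Int) =>
        "\"vehicleat l" ++ PySem.Int.toStr (PySem.Int.floordiv (k + 3) 2)
          ++ "x" ++ PySem.Int.toStr (PySem.Int.floordiv (k + 2) 2) ++ "\"&X(F(" ++ f ++ "))") := by
    funext acc k
    unfold pvLoc
    simp only [← String.append_assoc]
    rw [show ("\"vehicleat " ++ "l" : String) = "\"vehicleat l" from rfl]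
  have hinit : "\"vehicleat " ++ pvLoc (n - 1) ++ "\""
      = "\"vehicleat l" ++ PySem.Int.toStr (PySem.Int.floordiv (n + 2) 2)
          ++ "x" ++ PySem.Int.toStr (PySem.Int.floordiv (n + 1) 2) ++ "\"" := by
    unfold pvLoc
    rw [show n - 1 + 3 = n + 2 from by ring, show n - 1 + 2 = n + 1 from by ring]
    simp only [← String.append_assoc]
    rw [show ("\"vehicleat " ++ "l" : String) = "\"vehicleat l" from rfl]
  rw [hfun, hinit]
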